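-- pv_equiv track=rewrite | github.com/BojungChoi/2025_Team_Curry_Jun | 03_codingTest/02_problem.py | solution
-- ===== SOURCE A (Python) =====
-- def solution(r_str, d_str):
--     char_count = {}  # d_str 내 문자 개수를 저장할 딕셔너리 생성
--
--
--     for char in d_str:  # d_str의 모든 문자에 대해 반복
--         if char in char_count:  # 이미 존재하는 문자라면
--             char_count[char] += 1 # 개수 증가
--         else:  # 처음 등장한 문자라면 개수 1로 초기화
--             char_count[char] = 1
--
--     for char in r_str:  # r_str의 모든 문자에 대해 반복
--         if char not in char_count or char_count[char] == 0:  # 문자가 없거나 개수가 부족하면 False 반환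
--             return False
--         char_count[char] -= 1  # 사용한 문자는 개수 감소
--
--     return True  # 모든 문자를 사용할 수 있으면 True 반환
-- ===== SOURCE B (Python) =====
-- def solution(r_str, d_str):
--     need = {}
--     for ch in r_str:
--         need[ch] = need.get(ch, 0) + 1
--     have = {}
--     for ch in d_str:
--         have[ch] = have.get(ch, 0) + 1
--     return all(have.get(ch, 0) >= n for ch, n in need.items())
-- ===== Notes on version B (the rewrite author's own statement) =====
-- stated objective: alternative
-- what changed: A decrements a mutable count table char-by-char over r_str with an early-exit return; B aggregates both strings into frequency tables once and then compares the two tables, with no decrement and no early exit.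
import Mathlib
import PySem

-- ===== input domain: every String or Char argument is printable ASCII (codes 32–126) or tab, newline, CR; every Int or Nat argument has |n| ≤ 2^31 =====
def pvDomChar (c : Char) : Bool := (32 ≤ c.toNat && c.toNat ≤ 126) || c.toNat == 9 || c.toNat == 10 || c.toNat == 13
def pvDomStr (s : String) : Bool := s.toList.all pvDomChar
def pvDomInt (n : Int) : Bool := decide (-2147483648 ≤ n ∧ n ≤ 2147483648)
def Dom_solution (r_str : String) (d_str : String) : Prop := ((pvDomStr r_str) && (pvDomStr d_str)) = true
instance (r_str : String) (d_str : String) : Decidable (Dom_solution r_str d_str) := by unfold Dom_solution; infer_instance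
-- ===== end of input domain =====

-- B replaces A's decrement-with-early-exit loop by building two frequency tables and comparing them (alternative decomposition, same cost).


-- ===== PORT A =====
-- first loop of A: build char_count from d_str (branch on membership, as in the Python)
def solutionCount (d : PySem.Dict Char Int) (c : Char) : PySem.Dict Char Int :=
  if d.contains c then d.modify c 0 (· + 1) else d.insert c 1

-- second loop of A: early-exit decrement over r_str
def solutionLoop (cc : PySem.Dict Char Int) : List Char → Bool
  | [] => true
  | c :: rest =>
    if !cc.contains c || cc.getD c 0 == 0 then false
    else solutionLoop (cc.modify c 0 (· - 1)) rest

def solution (r_str : String) (d_str : String) : Bool :=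
  solutionLoop (d_str.toList.foldl solutionCount PySem.Dict.empty) r_str.toList

-- ===== PORT B =====
def solution_alt (r_str : String) (d_str : String) : Bool :=
  let need : PySem.Dict Char Int :=
    r_str.toList.foldl (fun m c => m.insert c (m.getD c 0 + 1)) PySem.Dict.empty
  let have_ : PySem.Dict Char Int :=
    d_str.toList.foldl (fun m c => m.insert c (m.getD c 0 + 1)) PySem.Dict.empty
  need.items.all (fun p => decide (p.2 ≤ have_.getD p.1 0))

-- ===== PRECONDITION & SPEC =====
def Spec_solution (r_str : String) (d_str : String) (out : Bool) : Prop := out = solution_alt r_str d_str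
instance (r_str : String) (d_str : String) (out : Bool) : Decidable (Spec_solution r_str d_str out) := by unfold Spec_solution; infer_instance

-- ===== CLAIM (what is proved, stated in full; the proofs are below) =====
def Claim_equal_solution : Prop := ∀ (r_str : String) (d_str : String), Dom_solution r_str d_str → Spec_solution r_str d_str (solution r_str d_str)

-- ===== LEMMAS AND PROOFS =====

-- the branchy counting loop of A counts occurrences
lemma countA_getD : ∀ (l : List Char) (d : PySem.Dict Char Int) (v : Char),
    (l.foldl solutionCount d).getD v 0 = d.getD v 0 + l.count v := by
  intro l
  induction l with
  | nil => intro d v; simp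
  | cons c rest ih =>
    intro d v
    simp only [List.foldl_cons, ih, solutionCount]
    by_cases hv : v = c
    · subst hv
      split
      · rw [PySem.Dict.getD_modify_self]
        simp only [List.count_cons_self]; push_cast; ring
      · rename_i hnc
        rw [PySem.Dict.getD_insert_self,
            PySem.Dict.getD_of_not_contains _ _ (by simpa using hnc)]
        simp only [List.count_cons_self]
        push_cast
        ring
    · have h1 : (rest.count v : Int) = ((c :: rest).count v : Int) := by
        simp [Ne.symm hv]
      split
      · rw [PySem.Dict.getD_modify_of_ne _ _ _ hv, h1]
      · rw [PySem.Dict.getD_insert_of_ne _ _ _ hv, h1]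

-- A's early-exit loop succeeds iff every character demand is covered
lemma loopA_iff : ∀ (rs : List Char) (cc : PySem.Dict Char Int),
    (∀ v, 0 ≤ cc.getD v 0) →
    (solutionLoop cc rs = true ↔ ∀ c, (rs.count c : Int) ≤ cc.getD c 0) := by
  intro rs
  induction rs with
  | nil =>
    intro cc hnn
    constructor
    · intro _ c; simpa using hnn c
    · intro _; rfl
  | cons c rest ih =>
    intro cc hnn
    simp only [solutionLoop]
    by_cases hz : cc.getD c 0 = 0
    · have hcond : (!cc.contains c || cc.getD c 0 == 0) = true := by simp [hz]
      rw [if_pos hcond]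
      constructor
      · intro h; simp at h
      · intro h
        exfalso
        have := h c
        rw [hz, List.count_cons_self] at this
        omega
    · have hcont : cc.contains c = true := by
        by_contra hc
        exact hz (PySem.Dict.getD_of_not_contains _ _ (by simpa using hc))
      have hcond : (!cc.contains c || cc.getD c 0 == 0) = false := by
        simp [hcont, hz]
      rw [if_neg (by simp [hcond])]
      have hnn' : ∀ v, 0 ≤ (cc.modify c 0 (· - 1)).getD v 0 := by
        intro v
        rw [PySem.Dict.getD_modify]
        split
        · have := hnn c; omega
        · exact hnn v
      rw [ih _ hnn']
      have key : ∀ v, ((rest.count v : Int) ≤ (cc.modify c 0 (· - 1)).getD v 0)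
          ↔ (((c :: rest).count v : Int) ≤ cc.getD v 0) := by
        intro v
        rw [PySem.Dict.getD_modify, List.count_cons]
        by_cases hv : v = c
        · subst hv
          simp only [BEq.rfl]
          push_cast
          omega
        · simp [hv, Ne.symm hv]
      exact forall_congr' key

-- B succeeds iff every character demand is covered
lemma altB_iff (r d : List Char) :
    ((PySem.Dict.counter r).items.all
        (fun p => decide (p.2 ≤ (PySem.Dict.counter d).getD p.1 0)) = true)
      ↔ ∀ c, (r.count c : Int) ≤ (d.count c : Int) := by
  rw [PySem.Dict.items_counter]
  simp only [List.all_map, List.all_eq_true, Function.comp, decide_eq_true_eq,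
    PySem.Dict.getD_counter]
  constructor
  · intro h c
    by_cases hm : c ∈ r
    · exact h c ((PySem.Set.mem_ofList r c).2 hm)
    · simp [List.count_eq_zero_of_not_mem hm]
  · intro h c _; exact h c

-- ===== VERDICT (by name: the statement is the Claim_ definition above) =====
theorem solution_spec : Claim_equal_solution := by
  intro r d _
  unfold Spec_solution solution solution_alt
  simp only [PySem.Dict.foldl_insert_getD_add_one_eq_counter]
  have hA : solutionLoop (d.toList.foldl solutionCount PySem.Dict.empty) r.toList = true
      ↔ ∀ c, (r.toList.count c : Int) ≤ (d.toList.count c : Int) := by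
    rw [loopA_iff _ _ (fun v => by rw [countA_getD]; simp)]
    constructor
    · intro h c; have := h c; rwa [countA_getD, PySem.Dict.getD_empty, zero_add] at this
    · intro h c; rw [countA_getD, PySem.Dict.getD_empty, zero_add]; exact h c
  rw [Bool.eq_iff_iff, hA]
  exact (altB_iff _ _).symm
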